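-- pv_equiv track=rewrite | github.com/danielkongcau-del/MaskGen | partition_gen/explainer.py | _count_roles_by_label
-- ===== SOURCE A (Python) =====
-- from typing import Dict, List, Sequence, Tuple
--
-- def _count_roles_by_label(faces: Sequence[Dict[str, object]], selected_roles: Dict[int, str]) -> Dict[str, Dict[str, int]]:
--     output: Dict[str, Dict[str, int]] = {}
--     for face in faces:
--         label = str(int(face.get("label", -1)))
--         role = str(selected_roles.get(int(face["id"]), "unassigned"))
--         role_counts = output.setdefault(label, {})
--         role_counts[role] = int(role_counts.get(role, 0)) + 1
--     return output
-- ===== SOURCE B (Python) =====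
-- def _count_roles_by_label(faces, selected_roles):
--     pairs = [(str(int(face.get("label", -1))),
--               str(selected_roles.get(int(face["id"]), "unassigned")))
--              for face in faces]
--     labels = list(dict.fromkeys(l for l, _ in pairs))
--     return {l: {r: pairs.count((l, r))
--                 for r in dict.fromkeys(r2 for l2, r2 in pairs if l2 == l)}
--             for l in labels}
-- ===== Notes on version B (the rewrite author's own statement) =====
-- stated objective: alternative
-- what changed: A builds the nested dict incrementally in one pass with setdefault/get; B first extracts the (label, role) pair of every face, then builds the result by first-occurrence deduplication (dict.fromkeys) of labels and roles with pairs.count for each count.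
import Mathlib
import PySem

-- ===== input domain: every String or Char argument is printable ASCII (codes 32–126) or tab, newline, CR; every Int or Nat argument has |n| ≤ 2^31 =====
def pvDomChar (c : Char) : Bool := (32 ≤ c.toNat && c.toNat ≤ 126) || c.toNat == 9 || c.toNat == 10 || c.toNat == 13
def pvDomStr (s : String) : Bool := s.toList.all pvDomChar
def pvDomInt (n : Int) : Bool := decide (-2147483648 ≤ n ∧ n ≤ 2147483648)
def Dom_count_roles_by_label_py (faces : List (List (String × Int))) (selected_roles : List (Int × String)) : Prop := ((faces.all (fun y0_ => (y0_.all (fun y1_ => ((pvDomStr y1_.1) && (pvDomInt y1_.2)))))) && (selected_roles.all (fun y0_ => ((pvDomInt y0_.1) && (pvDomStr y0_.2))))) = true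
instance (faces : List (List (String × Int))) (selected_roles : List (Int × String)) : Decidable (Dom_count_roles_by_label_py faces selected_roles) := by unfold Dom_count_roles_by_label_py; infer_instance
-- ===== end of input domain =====

-- B replaces A's single-pass nested-dict accumulation by a two-phase scheme: extract the
-- (label, role) pair of every face, then build the result with first-occurrence dedup and
-- pairs.count; objective: alternative (same values, genuinely different algorithm, not faster).

-- ===== PORT A =====
-- Literal port of A: one fold over faces threading the nested output dict; the Option layer
-- is none exactly when some face lacks the "id" key (Python's KeyError), excluded by Pre_.
def count_roles_by_label_py (faces : List (List (String × Int))) (selected_roles : List (Int × String)) : List (String × List (String × Int)) :=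
  let res := faces.foldl (fun acc face =>
    match acc with
    | none => none
    | some output =>
      match (PySem.Dict.mk face).get? "id" with
      | none => none  -- face["id"] raises KeyError
      | some fid =>
        let label := PySem.Int.toStr ((PySem.Dict.mk face).getD "label" (-1))
        let role := (PySem.Dict.mk selected_roles).getD fid "unassigned"
        let role_counts := (output.setdefault label PySem.Dict.empty).getD label PySem.Dict.empty
        some ((output.setdefault label PySem.Dict.empty).insert label
          (role_counts.insert role (role_counts.getD role 0 + 1))))
    (some (PySem.Dict.empty : PySem.Dict String (PySem.Dict String Int)))
  match res with
  | some d => d.items.map (fun x => (x.1, x.2.items))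
  | none => []

-- ===== PORT B =====
-- Port of Source B: the pairs list comprehension (none on the first face without "id"),
-- then dict.fromkeys dedup (= PySem.Set.ofList) and counting via pairs.count.
def count_roles_by_label_py_alt (faces : List (List (String × Int))) (selected_roles : List (Int × String)) : List (String × List (String × Int)) :=
  match faces.mapM (fun face =>
      ((PySem.Dict.mk face).get? "id").map (fun fid =>
        (PySem.Int.toStr ((PySem.Dict.mk face).getD "label" (-1)),
         (PySem.Dict.mk selected_roles).getD fid "unassigned"))) with
  | none => []
  | some pairs =>
    (PySem.Set.ofList (pairs.map Prod.fst)).map (fun l =>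
      (l, (PySem.Set.ofList ((pairs.filter (fun p => p.1 == l)).map Prod.snd)).map
            (fun r => (r, (pairs.count (l, r) : Int)))))

-- ===== PRECONDITION & SPEC =====
-- Pre_ excludes exactly the inputs where A raises KeyError: some face without an "id" key.
def Pre_count_roles_by_label_py (faces : List (List (String × Int))) (selected_roles : List (Int × String)) : Prop :=
  (faces.all (fun face => (PySem.Dict.mk face).contains "id")) = true
instance (faces : List (List (String × Int))) (selected_roles : List (Int × String)) : Decidable (Pre_count_roles_by_label_py faces selected_roles) := by unfold Pre_count_roles_by_label_py; infer_instance

def pvWitness_count_roles_by_label_py : (List (List (String × Int))) × (List (Int × String)) :=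
  ([[("id", 1), ("label", 2)], [("id", 2)], [("id", 1), ("label", 2)]], [(1, "driver")])

def Spec_count_roles_by_label_py (faces : List (List (String × Int))) (selected_roles : List (Int × String)) (out : List (String × List (String × Int))) : Prop := out = count_roles_by_label_py_alt faces selected_roles
instance (faces : List (List (String × Int))) (selected_roles : List (Int × String)) (out : List (String × List (String × Int))) : Decidable (Spec_count_roles_by_label_py faces selected_roles out) := by unfold Spec_count_roles_by_label_py; infer_instance

-- ===== CLAIM (what is proved, stated in full; the proofs are below) =====
def Claim_equal_count_roles_by_label_py : Prop := ∀ (faces : List (List (String × Int))) (selected_roles : List (Int × String)), Dom_count_roles_by_label_py faces selected_roles → Pre_count_roles_by_label_py faces selected_roles → Spec_count_roles_by_label_py faces selected_roles (count_roles_by_label_py faces selected_roles)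

-- ===== LEMMAS AND PROOFS =====

-- A's loop body, as a function of the already-extracted (label, role) pair.
def crblStep (out : PySem.Dict String (PySem.Dict String Int)) (p : String × String) : PySem.Dict String (PySem.Dict String Int) :=
  let rc := (out.setdefault p.1 PySem.Dict.empty).getD p.1 PySem.Dict.empty
  (out.setdefault p.1 PySem.Dict.empty).insert p.1 (rc.insert p.2 (rc.getD p.2 0 + 1))

-- the inner dict (as an items list) that the characterisation assigns to label l
def crblInner (ps : List (String × String)) (l : String) : List (String × Int) :=
  (PySem.Set.ofList ((ps.filter (fun p => p.1 == l)).map Prod.snd)).map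
    (fun r => (r, (ps.count (l, r) : Int)))

lemma crbl_char (ps : List (String × String)) :
    (ps.foldl crblStep PySem.Dict.empty).items
      = (PySem.Set.ofList (ps.map Prod.fst)).map (fun l => (l, PySem.Dict.mk (crblInner ps l))) := by
  induction ps using List.reverseRecOn with
  | nil => rfl
  | append_singleton ps p ih =>
    obtain ⟨l, r⟩ := p
    rw [List.foldl_append, List.foldl_cons, List.foldl_nil]
    set D := ps.foldl crblStep PySem.Dict.empty with hD
    have hkeys : D.keys = PySem.Set.ofList (ps.map Prod.fst) := by
      show D.items.map Prod.fst = _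
      rw [ih, List.map_map]; simp [Function.comp_def]
    have hnd : D.keys.Nodup := by rw [hkeys]; exact PySem.Set.nodup_ofList _
    have hcont : D.contains l = decide (l ∈ PySem.Set.ofList (ps.map Prod.fst)) := by
      rw [PySem.Dict.contains_eq_decide_mem_keys, hkeys]
    -- labels different from l keep their inner list
    have hInner_ne : ∀ x, x ≠ l → crblInner (ps ++ [(l, r)]) x = crblInner ps x := by
      intro x hx
      have hf : (ps ++ [(l, r)]).filter (fun p => p.1 == x) = ps.filter (fun p => p.1 == x) := by
        rw [List.filter_append]; simp [Ne.symm hx]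
      unfold crblInner
      rw [hf]
      refine List.map_congr_left (fun r'' _ => ?_)
      have : (ps ++ [(l, r)]).count (x, r'') = ps.count (x, r'') := by
        rw [List.count_append, List.count_singleton]
        simp [Prod.ext_iff, Ne.symm hx]
      rw [this]
    rw [List.map_append]
    simp only [List.map_cons, List.map_nil]
    rw [PySem.Set.ofList_append_singleton]
    by_cases hm : l ∈ PySem.Set.ofList (ps.map Prod.fst)
    · -- label already present
      have hc : D.contains l = true := by rw [hcont]; simpa using hm
      have hsd : D.setdefault l PySem.Dict.empty = D := PySem.Dict.setdefault_of_contains _ _ hc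
      have hmemD : (l, PySem.Dict.mk (crblInner ps l)) ∈ D.items := by
        rw [ih]; exact List.mem_map_of_mem hm
      have hrc : D.getD l PySem.Dict.empty = PySem.Dict.mk (crblInner ps l) :=
        PySem.Dict.getD_of_mem_items _ hmemD hnd _
      have hrckeys : (PySem.Dict.mk (crblInner ps l)).keys
          = PySem.Set.ofList ((ps.filter (fun p => p.1 == l)).map Prod.snd) := by
        show (crblInner ps l).map Prod.fst = _
        rw [crblInner, List.map_map]; simp [Function.comp_def]
      have hrcnd : (PySem.Dict.mk (crblInner ps l)).keys.Nodup := by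
        rw [hrckeys]; exact PySem.Set.nodup_ofList _
      have hrcget : (PySem.Dict.mk (crblInner ps l)).getD r 0 = (ps.count (l, r) : Int) := by
        by_cases hr : r ∈ PySem.Set.ofList ((ps.filter (fun p => p.1 == l)).map Prod.snd)
        · refine PySem.Dict.getD_of_mem_items _ ?_ hrcnd _
          show (r, (ps.count (l, r) : Int)) ∈ crblInner ps l
          exact List.mem_map_of_mem hr
        · have h0 : (ps.count (l, r)) = 0 := by
            rw [List.count_eq_zero]
            intro hmem
            exact hr (by
              rw [PySem.Set.mem_ofList]
              exact List.mem_map_of_mem (List.mem_filter.mpr ⟨hmem, by simp⟩))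
          rw [PySem.Dict.getD_of_not_contains, h0]; rfl
          rw [PySem.Dict.contains_eq_decide_mem_keys, hrckeys]
          simpa using hr
      simp only [crblStep, hsd, hrc, hrcget]
      rw [PySem.Dict.items_insert_of_contains _ _ hc, ih, PySem.Set.add_of_mem hm, List.map_map]
      refine List.map_congr_left (fun x _ => ?_)
      by_cases hx : x = l
      · subst hx
        simp only [Function.comp_apply, beq_self_eq_true, if_pos]
        refine congrArg _ (PySem.Dict.ext ?_)
        show ((PySem.Dict.mk (crblInner ps x)).insert r ((ps.count (x, r) : Int) + 1)).items
            = crblInner (ps ++ [(x, r)]) x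
        have hfx : (ps ++ [(x, r)]).filter (fun p => p.1 == x) = ps.filter (fun p => p.1 == x) ++ [(x, r)] := by
          rw [List.filter_append]; simp
        have hcx : ∀ r'', (ps ++ [(x, r)]).count (x, r'')
            = ps.count (x, r'') + (if r'' = r then 1 else 0) := by
          intro r''
          rw [List.count_append, List.count_singleton]
          by_cases hrr : r'' = r
          · subst hrr; simp
          · simp [hrr, Ne.symm hrr]
        by_cases hr : r ∈ PySem.Set.ofList ((ps.filter (fun p => p.1 == x)).map Prod.snd)
        · have hcr : (PySem.Dict.mk (crblInner ps x)).contains r = true := by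
            rw [PySem.Dict.contains_eq_decide_mem_keys, hrckeys]; simpa using hr
          rw [PySem.Dict.items_insert_of_contains _ _ hcr]
          show (crblInner ps x).map _ = _
          unfold crblInner
          rw [hfx, List.map_append]
          simp only [List.map_cons, List.map_nil]
          rw [PySem.Set.ofList_append_singleton, PySem.Set.add_of_mem hr, List.map_map]
          refine List.map_congr_left (fun r'' _ => ?_)
          by_cases hrr : r'' = r
          · subst hrr; simp [hcx]
          · simp [hcx, hrr]
        · have hcr : (PySem.Dict.mk (crblInner ps x)).contains r = false := by
            rw [PySem.Dict.contains_eq_decide_mem_keys, hrckeys]; simpa using hr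
          rw [PySem.Dict.items_insert_of_not_contains _ _ hcr]
          show crblInner ps x ++ _ = _
          have h0 : (ps.count (x, r)) = 0 := by
            rw [List.count_eq_zero]
            intro hmem
            exact hr (by
              rw [PySem.Set.mem_ofList]
              exact List.mem_map_of_mem (List.mem_filter.mpr ⟨hmem, by simp⟩))
          unfold crblInner
          rw [hfx, List.map_append]
          simp only [List.map_cons, List.map_nil]
          rw [PySem.Set.ofList_append_singleton, PySem.Set.add_of_not_mem hr, List.map_append]
          refine congrArg₂ _ (List.map_congr_left (fun r'' hr'' => ?_)) ?_
          · have : r'' ≠ r := fun hrr => hr (hrr ▸ hr'')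
            simp [hcx, this]
          · simp [hcx, h0]
      · -- other labels untouched
        simp only [Function.comp_apply]
        rw [if_neg (by simpa using hx), hInner_ne x hx]
    · -- fresh label: appended at the end
      have hc : D.contains l = false := by rw [hcont]; simpa using hm
      have hsd : D.setdefault l PySem.Dict.empty = D.insert l PySem.Dict.empty :=
        PySem.Dict.setdefault_of_not_contains _ _ hc
      have hnotin : (l, r) ∉ ps := fun hmem =>
        hm (by rw [PySem.Set.mem_ofList]; exact List.mem_map_of_mem hmem)
      simp only [crblStep, hsd, PySem.Dict.getD_insert_self, PySem.Dict.insert_insert_self]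
      rw [PySem.Dict.items_insert_of_not_contains _ _ hc, ih, PySem.Set.add_of_not_mem hm,
        List.map_append]
      refine congrArg₂ _ (List.map_congr_left (fun x hx => ?_)) ?_
      · have hxl : x ≠ l := fun hxl => hm (hxl ▸ hx)
        rw [hInner_ne x hxl]
      · have hfl : ps.filter (fun p => p.1 == l) = [] := by
          rw [List.filter_eq_nil_iff]
          intro q hq
          simp only [beq_iff_eq]
          intro hql
          exact hm (by rw [PySem.Set.mem_ofList]; exact hql ▸ List.mem_map_of_mem hq)
        have h0 : (ps.count (l, r)) = 0 := List.count_eq_zero.mpr hnotin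
        have hinner : crblInner (ps ++ [(l, r)]) l = [(r, 1)] := by
          unfold crblInner
          rw [List.filter_append, hfl]
          simp [PySem.Set.ofList, List.count_append, h0, List.count_singleton]
        simp only [List.map_cons, List.map_nil]
        rw [hinner]
        have : (PySem.Dict.empty : PySem.Dict String Int).insert r
            ((PySem.Dict.empty : PySem.Dict String Int).getD r 0 + 1) = PySem.Dict.mk [(r, 1)] := by
          apply PySem.Dict.ext
          rw [PySem.Dict.items_insert_of_not_contains _ _ (PySem.Dict.contains_empty r),
            PySem.Dict.getD_of_not_contains _ _ (PySem.Dict.contains_empty r)]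
          rfl
        rw [this]

-- A's option-threaded fold over faces equals the fold of crblStep over the extracted pairs.
lemma crbl_A_fold (faces : List (List (String × Int))) (selected_roles : List (Int × String))
    (h : (faces.all (fun face => (PySem.Dict.mk face).contains "id")) = true)
    (out : PySem.Dict String (PySem.Dict String Int)) :
    faces.foldl (fun acc face =>
      match acc with
      | none => none
      | some output =>
        match (PySem.Dict.mk face).get? "id" with
        | none => none
        | some fid =>
          let label := PySem.Int.toStr ((PySem.Dict.mk face).getD "label" (-1))
          let role := (PySem.Dict.mk selected_roles).getD fid "unassigned"
          let role_counts := (output.setdefault label PySem.Dict.empty).getD label PySem.Dict.empty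
          some ((output.setdefault label PySem.Dict.empty).insert label
            (role_counts.insert role (role_counts.getD role 0 + 1)))) (some out)
    = some (((faces.map (fun face =>
        (PySem.Int.toStr ((PySem.Dict.mk face).getD "label" (-1)),
         (PySem.Dict.mk selected_roles).getD (((PySem.Dict.mk face).get? "id").getD 0) "unassigned")))).foldl crblStep out) := by
  induction faces generalizing out with
  | nil => rfl
  | cons face rest ih =>
    simp only [List.all_cons, Bool.and_eq_true] at h
    obtain ⟨h1, h2⟩ := h
    rw [PySem.Dict.contains_eq_isSome_get?] at h1
    obtain ⟨fid, hfid⟩ := Option.isSome_iff_exists.mp h1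
    simp only [List.foldl_cons, List.map_cons, hfid, crblStep, Option.getD_some]
    exact ih h2 _

lemma crbl_B_pairs (faces : List (List (String × Int))) (selected_roles : List (Int × String))
    (h : (faces.all (fun face => (PySem.Dict.mk face).contains "id")) = true) :
    faces.mapM (fun face =>
      ((PySem.Dict.mk face).get? "id").map (fun fid =>
        (PySem.Int.toStr ((PySem.Dict.mk face).getD "label" (-1)),
         (PySem.Dict.mk selected_roles).getD fid "unassigned")))
    = some (faces.map (fun face =>
        (PySem.Int.toStr ((PySem.Dict.mk face).getD "label" (-1)),
         (PySem.Dict.mk selected_roles).getD (((PySem.Dict.mk face).get? "id").getD 0) "unassigned"))) := by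
  induction faces with
  | nil => rfl
  | cons face rest ih =>
    simp only [List.all_cons, Bool.and_eq_true] at h
    obtain ⟨h1, h2⟩ := h
    rw [PySem.Dict.contains_eq_isSome_get?] at h1
    obtain ⟨fid, hfid⟩ := Option.isSome_iff_exists.mp h1
    simp only [List.mapM_cons, hfid, Option.map_some, ih h2, Option.getD_some, List.map_cons,
      Option.pure_def, Option.bind_some, Option.bind_eq_bind]

-- ===== VERDICT (by name: the statement is the Claim_ definition above) =====
theorem count_roles_by_label_py_spec : Claim_equal_count_roles_by_label_py := by
  intro faces selected_roles _ hpre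
  unfold Spec_count_roles_by_label_py count_roles_by_label_py count_roles_by_label_py_alt
  rw [crbl_A_fold faces selected_roles hpre, crbl_B_pairs faces selected_roles hpre]
  simp only [crbl_char]
  simp [crblInner]
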